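-- pv_equiv track=rewrite | github.com/cybelewang/leetcode-python | code1296DivideArrayinSetsOfKConsecutiveNumbers.py | isPossibleDivide2
-- ===== SOURCE A (Python) =====
-- from typing import List
--
-- from collections import Counter, deque
--
-- def isPossibleDivide2(nums: List[int], k: int) -> bool:
--     count = Counter(nums)
--     for num in sorted(count):
--         if count[num] == 0:
--             continue
--         w = count[num]
--         for i in range(num, num + k):
--             count[i] -= w
--             if count[i] < 0:
--                 return False
--
--     return True
-- ===== SOURCE B (Python) =====
-- from collections import Counter, deque
--
-- def isPossibleDivide2(nums, k):
--     count = Counter(nums)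
--     open_groups = 0          # groups still needing the next value
--     q = deque()              # (start_value, groups_started_there), oldest first
--     prev = None
--     for v in sorted(count):
--         if open_groups > 0 and v != prev + 1:
--             return False
--         c = count[v]
--         if c < open_groups:
--             return False
--         if c > open_groups:
--             q.append((v, c - open_groups))
--         open_groups = c
--         while q and q[0][0] <= v - k + 1:
--             open_groups -= q.popleft()[1]
--         prev = v
--     return open_groups == 0
-- ===== Notes on version B (the rewrite author's own statement) =====
-- stated objective: alternative
-- what changed: A subtracts each value's group count across its whole k-wide window with an inner range(num, num+k) loop mutating the Counter; B never mutates the counts and instead sweeps the sorted distinct values once, carrying a deque of open-group counts with contiguity/supply checks on arrival and incremental expiry of finished groups.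
import Mathlib
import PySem

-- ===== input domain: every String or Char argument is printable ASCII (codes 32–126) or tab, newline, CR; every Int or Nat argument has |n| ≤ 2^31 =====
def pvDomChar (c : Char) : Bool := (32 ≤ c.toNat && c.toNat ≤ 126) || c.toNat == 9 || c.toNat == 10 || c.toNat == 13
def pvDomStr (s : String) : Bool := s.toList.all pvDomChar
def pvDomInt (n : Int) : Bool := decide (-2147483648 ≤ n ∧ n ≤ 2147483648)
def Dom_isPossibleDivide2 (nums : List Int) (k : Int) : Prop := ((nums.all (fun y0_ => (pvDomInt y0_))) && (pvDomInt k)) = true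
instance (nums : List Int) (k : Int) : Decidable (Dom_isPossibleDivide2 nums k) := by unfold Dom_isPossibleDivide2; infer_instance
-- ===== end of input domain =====

-- B replaces A's per-value window subtraction (an inner loop over range(num, num+k) mutating
-- the counter) by a sorted sweep carrying a deque of open-group counts with incremental expiry.
-- Equivalence of the return value is proved for all inputs (both functions are total).

-- ===== PORT A =====
-- inner loop: 'for i in range(num, num+k): count[i] -= w; if count[i] < 0: return False'
-- (the range is iterated lazily, index by index, exactly as Python's range object is)
def pvInnerA (w stop i : Int) (d : PySem.Dict Int Int) : Option (PySem.Dict Int Int) :=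
  if i < stop then
    let d' := d.insert i (d.getD i 0 - w)
    if d'.getD i 0 < 0 then none else pvInnerA w stop (i + 1) d'
  else some d
termination_by (stop - i).toNat
decreasing_by omega

-- outer loop: 'for num in sorted(count): …'
def pvOuterA (k : Int) : List Int → PySem.Dict Int Int → Bool
  | [], _ => true
  | v :: rest, d =>
    if d.getD v 0 == 0 then pvOuterA k rest d
    else
      match pvInnerA (d.getD v 0) (v + k) v d with
      | none => false
      | some d' => pvOuterA k rest d'

def isPossibleDivide2 (nums : List Int) (k : Int) : Bool :=
  let count := PySem.Dict.counter nums
  pvOuterA k (PySem.List.sorted count.keys (fun x => x) false) count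

-- ===== PORT B =====
-- 'while q and q[0][0] <= v - k + 1: open_groups -= q.popleft()[1]'
def pvExpire (k v : Int) : Int → List (Int × Int) → Int × List (Int × Int)
  | opn, [] => (opn, [])
  | opn, (s, n) :: t => if s ≤ v - k + 1 then pvExpire k v (opn - n) t else (opn, (s, n) :: t)

-- main loop of B; prev is only read when 0 < opn, which never holds on the first iteration,
-- so Python's initial 'prev = None' is ported as an arbitrary initial value 0
def pvRunB (c : PySem.Dict Int Int) (k : Int) : List Int → Int → Int → List (Int × Int) → Bool
  | [], _, opn, _ => opn == 0
  | v :: rest, prev, opn, q =>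
    if 0 < opn ∧ v ≠ prev + 1 then false
    else if c.getD v 0 < opn then false
    else
      let cv := c.getD v 0
      let q1 := if opn < cv then q ++ [(v, cv - opn)] else q
      let p2 := pvExpire k v cv q1
      pvRunB c k rest v p2.1 p2.2

def isPossibleDivide2_alt (nums : List Int) (k : Int) : Bool :=
  let count := PySem.Dict.counter nums
  pvRunB count k (PySem.List.sorted count.keys (fun x => x) false) 0 0 []

-- ===== PRECONDITION & SPEC =====
def Spec_isPossibleDivide2 (nums : List Int) (k : Int) (out : Bool) : Prop := out = isPossibleDivide2_alt nums k
instance (nums : List Int) (k : Int) (out : Bool) : Decidable (Spec_isPossibleDivide2 nums k out) := by unfold Spec_isPossibleDivide2; infer_instance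

-- ===== CLAIM (what is proved, stated in full; the proofs are below) =====
def Claim_equal_isPossibleDivide2 : Prop := ∀ (nums : List Int) (k : Int), Dom_isPossibleDivide2 nums k → Spec_isPossibleDivide2 nums k (isPossibleDivide2 nums k)

-- ===== LEMMAS AND PROOFS =====

-- list form of A's inner loop, used only by the proofs (bridged to pvInnerA below)
def pvInnerL (w : Int) : List Int → PySem.Dict Int Int → Option (PySem.Dict Int Int)
  | [], d => some d
  | i :: rest, d =>
    let d' := d.insert i (d.getD i 0 - w)
    if d'.getD i 0 < 0 then none else pvInnerL w rest d'

lemma pvInnerA_eq_list (w : Int) : ∀ (stop i : Int) (d : PySem.Dict Int Int),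
    pvInnerA w stop i d = pvInnerL w (PySem.List.pyRange i stop 1) d := by
  intro stop i
  induction hn : (stop - i).toNat generalizing i with
  | zero =>
    intro d
    have h : ¬ i < stop := by omega
    rw [pvInnerA, if_neg h, PySem.List.pyRange_one_eq_nil (by omega), pvInnerL]
  | succ n ih =>
    intro d
    have h : i < stop := by omega
    rw [pvInnerA, if_pos h, PySem.List.pyRange_one_cons h, pvInnerL]
    show (if (d.insert i (d.getD i 0 - w)).getD i 0 < 0 then none
          else pvInnerA w stop (i + 1) (d.insert i (d.getD i 0 - w)))
        = (if (d.insert i (d.getD i 0 - w)).getD i 0 < 0 then none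
          else pvInnerL w (PySem.List.pyRange (i + 1) stop 1) (d.insert i (d.getD i 0 - w)))
    split_ifs with hlt
    · rfl
    · exact ih (i + 1) (by omega) _

-- number of open groups of the deque q that cover the value x (group (s, n) covers s … s+k-1)
def pvCover (k x : Int) : List (Int × Int) → Int
  | [] => 0
  | (s, n) :: t => (if s ≤ x ∧ x < s + k then n else 0) + pvCover k x t

def pvSum : List (Int × Int) → Int
  | [] => 0
  | (_, n) :: t => n + pvSum t

lemma pvSum_append (q1 q2 : List (Int × Int)) : pvSum (q1 ++ q2) = pvSum q1 + pvSum q2 := by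
  induction q1 with
  | nil => simp [pvSum]
  | cons p t ih => cases p; simp [pvSum, ih]; ring

lemma pvSum_nonneg (q : List (Int × Int)) (h : ∀ p ∈ q, 0 < p.2) : 0 ≤ pvSum q := by
  induction q with
  | nil => simp [pvSum]
  | cons p t ih =>
    cases p with | mk s n =>
    have h1 := h (s, n) (by simp)
    have h2 : 0 ≤ pvSum t := ih (fun p hp => h p (by simp [hp]))
    simp [pvSum]; omega

lemma pvSum_eq_zero (q : List (Int × Int)) (h : ∀ p ∈ q, 0 < p.2) (hz : pvSum q = 0) : q = [] := by
  cases q with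
  | nil => rfl
  | cons p t =>
    exfalso
    cases p with | mk s n =>
    have h1 := h (s, n) (by simp)
    have h2 : 0 ≤ pvSum t := pvSum_nonneg t (fun p hp => h p (by simp [hp]))
    simp [pvSum] at hz; omega

lemma pvCover_append (k x : Int) (q1 q2 : List (Int × Int)) :
    pvCover k x (q1 ++ q2) = pvCover k x q1 + pvCover k x q2 := by
  induction q1 with
  | nil => simp [pvCover]
  | cons p t ih => cases p; simp [pvCover, ih]; ring

lemma pvCover_le_sum (k x : Int) (q : List (Int × Int)) (h : ∀ p ∈ q, 0 < p.2) :
    pvCover k x q ≤ pvSum q := by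
  induction q with
  | nil => simp [pvCover, pvSum]
  | cons p t ih =>
    cases p with | mk s n =>
    have h1 := h (s, n) (by simp)
    have h2 : pvCover k x t ≤ pvSum t := ih (fun p hp => h p (by simp [hp]))
    simp [pvCover, pvSum]; split_ifs <;> omega

lemma pvCover_eq_sum (k x : Int) (q : List (Int × Int)) (h : ∀ p ∈ q, p.1 ≤ x ∧ x < p.1 + k) :
    pvCover k x q = pvSum q := by
  induction q with
  | nil => simp [pvCover, pvSum]
  | cons p t ih =>
    cases p with | mk s n =>
    have h1 := h (s, n) (by simp)
    have h2 : pvCover k x t = pvSum t := ih (fun p hp => h p (by simp [hp]))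
    simp [pvCover, pvSum, h1, h2]

-- expire: the kept entries come from the input deque
lemma pvExpire_mem (k v : Int) : ∀ (q : List (Int × Int)) (opn : Int),
    ∀ p ∈ (pvExpire k v opn q).2, p ∈ q := by
  intro q
  induction q with
  | nil => intro opn p hp; simp [pvExpire] at hp
  | cons hd t ih =>
    intro opn p hp
    cases hd with | mk s n =>
    by_cases hs : s ≤ v - k + 1
    · simp [pvExpire, hs] at hp
      exact List.mem_cons_of_mem _ (ih _ p hp)
    · simp [pvExpire, hs] at hp
      simpa using hp

lemma pvExpire_pairwise (k v : Int) (P : Int × Int → Int × Int → Prop) :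
    ∀ (q : List (Int × Int)) (opn : Int), q.Pairwise P → ((pvExpire k v opn q).2).Pairwise P := by
  intro q
  induction q with
  | nil => intro opn _; simp [pvExpire]
  | cons hd t ih =>
    intro opn hq
    cases hd with | mk s n =>
    by_cases hs : s ≤ v - k + 1
    · simp only [pvExpire, hs, if_true]
      exact ih _ (List.Pairwise.of_cons hq)
    · simpa [pvExpire, hs] using hq

lemma pvExpire_sum (k v : Int) : ∀ (q : List (Int × Int)) (opn : Int), opn = pvSum q →
    (pvExpire k v opn q).1 = pvSum (pvExpire k v opn q).2 := by
  intro q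
  induction q with
  | nil => intro opn h; simpa [pvExpire, pvSum] using h
  | cons hd t ih =>
    intro opn h
    cases hd with | mk s n =>
    by_cases hs : s ≤ v - k + 1
    · simp only [pvExpire, hs, if_true]
      exact ih _ (by simp [pvSum] at h; omega)
    · simpa [pvExpire, hs] using h

lemma pvExpire_bound (k v : Int) : ∀ (q : List (Int × Int)) (opn : Int),
    q.Pairwise (fun a b => a.1 < b.1) →
    ∀ p ∈ (pvExpire k v opn q).2, v - k + 1 < p.1 := by
  intro q
  induction q with
  | nil => intro opn _ p hp; simp [pvExpire] at hp
  | cons hd t ih =>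
    intro opn hq p hp
    cases hd with | mk s n =>
    by_cases hs : s ≤ v - k + 1
    · simp only [pvExpire, hs, if_true] at hp
      exact ih _ (List.Pairwise.of_cons hq) p hp
    · simp [pvExpire, hs] at hp
      rcases hp with rfl | hp
      · simp only []; omega
      · have := (List.pairwise_cons.mp hq).1 p hp
        omega

lemma pvExpire_cover (k v x : Int) (hx : v < x) : ∀ (q : List (Int × Int)) (opn : Int),
    pvCover k x (pvExpire k v opn q).2 = pvCover k x q := by
  intro q
  induction q with
  | nil => intro opn; simp [pvExpire]
  | cons hd t ih =>
    intro opn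
    cases hd with | mk s n =>
    by_cases hs : s ≤ v - k + 1
    · have hnc : ¬ (s ≤ x ∧ x < s + k) := by omega
      simp only [pvExpire, hs, if_true, ih, pvCover, hnc, if_false]
      ring
    · simp [pvExpire, hs]

-- inner loop of A characterised (window indices are distinct)
lemma pvInnerL_none_iff (w : Int) : ∀ (L : List Int) (d : PySem.Dict Int Int), L.Nodup →
    (pvInnerL w L d = none ↔ ∃ i ∈ L, d.getD i 0 - w < 0) := by
  intro L
  induction L with
  | nil => intro d _; simp [pvInnerL]
  | cons i rest ih =>
    intro d hnd
    have hni : i ∉ rest := (List.nodup_cons.mp hnd).1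
    have hself : (d.insert i (d.getD i 0 - w)).getD i 0 = d.getD i 0 - w :=
      PySem.Dict.getD_insert_self d i _ 0
    by_cases hlt : d.getD i 0 - w < 0
    · simp only [pvInnerL, hself, if_pos hlt]
      constructor
      · intro _; exact ⟨i, List.mem_cons_self, hlt⟩
      · intro _; trivial
    · have hrec := ih (d.insert i (d.getD i 0 - w)) (List.nodup_cons.mp hnd).2
      simp only [pvInnerL, hself, if_neg hlt]
      rw [hrec]
      constructor
      · rintro ⟨j, hj, hjv⟩
        have hne : j ≠ i := fun h => hni (h ▸ hj)
        exact ⟨j, List.mem_cons_of_mem _ hj,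
          by rwa [PySem.Dict.getD_insert_of_ne d _ 0 hne] at hjv⟩
      · rintro ⟨j, hj, hjv⟩
        rcases List.mem_cons.mp hj with rfl | hj
        · omega
        · have hne : j ≠ i := fun h => hni (h ▸ hj)
          exact ⟨j, hj, by rwa [PySem.Dict.getD_insert_of_ne d _ 0 hne]⟩

lemma pvInnerL_some_getD (w : Int) : ∀ (L : List Int) (d d' : PySem.Dict Int Int), L.Nodup →
    pvInnerL w L d = some d' →
    ∀ x, d'.getD x 0 = if x ∈ L then d.getD x 0 - w else d.getD x 0 := by
  intro L
  induction L with
  | nil =>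
    intro d d' _ h x
    simp [pvInnerL] at h
    simp [h]
  | cons i rest ih =>
    intro d d' hnd h x
    have hni : i ∉ rest := (List.nodup_cons.mp hnd).1
    have hself : (d.insert i (d.getD i 0 - w)).getD i 0 = d.getD i 0 - w :=
      PySem.Dict.getD_insert_self d i _ 0
    by_cases hlt : d.getD i 0 - w < 0
    · simp [pvInnerL, hself, hlt] at h
    · simp only [pvInnerL, hself, if_neg hlt] at h
      have hx := ih _ _ (List.nodup_cons.mp hnd).2 h x
      by_cases hxi : x = i
      · subst hxi
        rw [hx, if_neg hni, hself, if_pos List.mem_cons_self]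
      · rw [hx, PySem.Dict.getD_insert_of_ne d _ 0 hxi]
        by_cases hxr : x ∈ rest
        · rw [if_pos hxr, if_pos (List.mem_cons_of_mem _ hxr)]
        · rw [if_neg hxr, if_neg (by simp [hxi, hxr])]

lemma pvInnerL_some_nonneg (w : Int) : ∀ (L : List Int) (d d' : PySem.Dict Int Int), L.Nodup →
    pvInnerL w L d = some d' →
    ∀ i ∈ L, 0 ≤ d'.getD i 0 := by
  intro L d d' hnd h i hi
  have hx := pvInnerL_some_getD w L d d' hnd h i
  rw [hx, if_pos hi]
  by_contra hneg
  simp only [not_lt] at hneg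
  have hnone : pvInnerL w L d = none := by
    rw [pvInnerL_none_iff w L d hnd]
    exact ⟨i, hi, by omega⟩
  simp [hnone] at h

-- invariants carried across one push+expire step of B
lemma pvStepInv (k v prev opn cv : Int) (q : List (Int × Int))
    (hvgt : prev < v)
    (hq : ∀ p ∈ q, prev - k + 1 < p.1 ∧ p.1 ≤ prev ∧ 0 < p.2)
    (hqs : q.Pairwise (fun a b => a.1 < b.1))
    (hopn : opn = pvSum q)
    (hle : opn ≤ cv) :
    (∀ p ∈ (pvExpire k v cv (if opn < cv then q ++ [(v, cv - opn)] else q)).2,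
        v - k + 1 < p.1 ∧ p.1 ≤ v ∧ 0 < p.2) ∧
    ((pvExpire k v cv (if opn < cv then q ++ [(v, cv - opn)] else q)).2).Pairwise (fun a b => a.1 < b.1) ∧
    (pvExpire k v cv (if opn < cv then q ++ [(v, cv - opn)] else q)).1
      = pvSum (pvExpire k v cv (if opn < cv then q ++ [(v, cv - opn)] else q)).2 ∧
    ∀ x, v < x →
      pvCover k x (pvExpire k v cv (if opn < cv then q ++ [(v, cv - opn)] else q)).2
        = pvCover k x q + (if v ≤ x ∧ x < v + k then cv - opn else 0) := by
  set q1 := if opn < cv then q ++ [(v, cv - opn)] else q with hq1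
  have hq1mem : ∀ p ∈ q1, p.1 ≤ v ∧ 0 < p.2 := by
    intro p hp
    rw [hq1] at hp
    split_ifs at hp with h
    · rcases List.mem_append.mp hp with hp | hp
      · have := hq p hp; omega
      · simp at hp; subst hp; simp; omega
    · have := hq p hp; omega
  have hq1pair : q1.Pairwise (fun a b => a.1 < b.1) := by
    rw [hq1]
    split_ifs with h
    · refine List.pairwise_append.mpr ⟨hqs, List.pairwise_singleton _ _, ?_⟩
      intro a ha b hb
      simp at hb
      have := hq a ha
      subst hb
      simp
      omega
    · exact hqs
  have hsum1 : pvSum q1 = cv := by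
    rw [hq1]
    split_ifs with h
    · rw [pvSum_append]; simp [pvSum]; omega
    · omega
  have hcov1 : ∀ x, pvCover k x q1 = pvCover k x q + (if v ≤ x ∧ x < v + k then cv - opn else 0) := by
    intro x
    rw [hq1]
    by_cases h : opn < cv
    · rw [if_pos h, pvCover_append]
      simp [pvCover]
    · rw [if_neg h]
      have hz : cv - opn = 0 := by omega
      rw [hz]
      simp
  refine ⟨?_, pvExpire_pairwise k v _ q1 cv hq1pair, pvExpire_sum k v q1 cv hsum1.symm, ?_⟩
  · intro p hp
    have h1 := pvExpire_bound k v q1 cv hq1pair p hp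
    have h2 := hq1mem p (pvExpire_mem k v q1 cv p hp)
    exact ⟨h1, h2.1, h2.2⟩
  · intro x hx
    rw [pvExpire_cover k v x hx, hcov1]

-- if some open group demands more copies of a value u than the multiset has, B ends in False
lemma pvRunB_doomed (k : Int) (c : PySem.Dict Int Int)
    (hcnn : ∀ x, 0 ≤ c.getD x 0) :
    ∀ (ks : List Int) (prev opn : Int) (q : List (Int × Int)),
    ks.Pairwise (· < ·) → (∀ v ∈ ks, prev < v) →
    (∀ x, prev < x → x ∉ ks → c.getD x 0 = 0) →
    (∀ p ∈ q, prev - k + 1 < p.1 ∧ p.1 ≤ prev ∧ 0 < p.2) →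
    q.Pairwise (fun a b => a.1 < b.1) →
    opn = pvSum q →
    ∀ u, prev < u → c.getD u 0 < pvCover k u q →
    pvRunB c k ks prev opn q = false := by
  intro ks
  induction ks with
  | nil =>
    intro prev opn q _ _ _ hq hqs hopn u hu hviol
    have hpos : ∀ p ∈ q, 0 < p.2 := fun p hp => (hq p hp).2.2
    have h1 : 0 ≤ c.getD u 0 := hcnn u
    have h2 : pvCover k u q ≤ pvSum q := pvCover_le_sum k u q hpos
    have hne : opn ≠ 0 := by omega
    simp [pvRunB, hne]
  | cons v rest ih =>
    intro prev opn q hks hgt hc0 hq hqs hopn u hu hviol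
    have hpos : ∀ p ∈ q, 0 < p.2 := fun p hp => (hq p hp).2.2
    have hvgt : prev < v := hgt v List.mem_cons_self
    by_cases hgap : 0 < opn ∧ v ≠ prev + 1
    · simp [pvRunB, hgap]
    by_cases hlt : c.getD v 0 < opn
    · simp [pvRunB, hgap, hlt]
    rcases lt_trichotomy u v with huv | huv | huv
    · -- u strictly between prev and v: q has a live group covering u, so the gap
      -- check must have fired; contradiction
      exfalso
      have hun : u ∉ (v :: rest) := by
        intro hm
        rcases List.mem_cons.mp hm with rfl | hm
        · omega
        · have := (List.pairwise_cons.mp hks).1 u hm; omega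
      have hcu : c.getD u 0 = 0 := hc0 u hu hun
      have h2 : pvCover k u q ≤ pvSum q := pvCover_le_sum k u q hpos
      omega
    · -- u = v: the arrival check c v < opn must have fired; contradiction
      exfalso
      subst huv
      have h2 : pvCover k u q ≤ pvSum q := pvCover_le_sum k u q hpos
      omega
    · -- v < u: step and keep the doomed witness
      simp only [pvRunB, if_neg hgap, if_neg hlt]
      obtain ⟨hq2, hq2p, hsum2, hcov2⟩ :=
        pvStepInv k v prev opn (c.getD v 0) q hvgt hq hqs hopn (by omega)
      apply ih v _ _ (List.pairwise_cons.mp hks).2 (List.pairwise_cons.mp hks).1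
        ?_ hq2 hq2p hsum2 u huv ?_
      · intro x hx hxm
        exact hc0 x (by omega) (by simp [hxm]; omega)
      · rw [hcov2 u huv]
        have : (0:Int) ≤ (if v ≤ u ∧ u < v + k then c.getD v 0 - opn else 0) := by
          split_ifs <;> omega
        omega

-- the main lockstep invariant: A's mutated counter is the original counts minus open-group cover
lemma pvMainAB (k : Int) (hk : 1 ≤ k) (c : PySem.Dict Int Int)
    (hcnn : ∀ x, 0 ≤ c.getD x 0) :
    ∀ (ks : List Int) (d : PySem.Dict Int Int) (prev opn : Int) (q : List (Int × Int)),
    ks.Pairwise (· < ·) → (∀ v ∈ ks, prev < v) →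
    (∀ x, prev < x → x ∉ ks → c.getD x 0 = 0) →
    (∀ p ∈ q, prev - k + 1 < p.1 ∧ p.1 ≤ prev ∧ 0 < p.2) →
    q.Pairwise (fun a b => a.1 < b.1) →
    opn = pvSum q →
    (∀ x, prev < x → d.getD x 0 = c.getD x 0 - pvCover k x q) →
    (∀ x, prev < x → 0 ≤ d.getD x 0) →
    pvOuterA k ks d = pvRunB c k ks prev opn q := by
  intro ks
  induction ks with
  | nil =>
    intro d prev opn q _ _ hc0 hq hqs hopn hd hd0
    have hpos : ∀ p ∈ q, 0 < p.2 := fun p hp => (hq p hp).2.2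
    have hcovall : pvCover k (prev + 1) q = pvSum q :=
      pvCover_eq_sum k (prev + 1) q (fun p hp => by have := hq p hp; omega)
    have h1 := hd (prev + 1) (by omega)
    have h2 := hd0 (prev + 1) (by omega)
    have h3 : c.getD (prev + 1) 0 = 0 := hc0 _ (by omega) (by simp)
    have h4 : 0 ≤ pvSum q := pvSum_nonneg q hpos
    have hz : opn = 0 := by omega
    simp [pvOuterA, pvRunB, hz]
  | cons v rest ih =>
    intro d prev opn q hks hgt hc0 hq hqs hopn hd hd0
    have hpos : ∀ p ∈ q, 0 < p.2 := fun p hp => (hq p hp).2.2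
    have hvgt : prev < v := hgt v List.mem_cons_self
    have hdv := hd v hvgt
    have hdv0 := hd0 v hvgt
    -- under A-liveness the gap check of B cannot fire
    have hgap : ¬ (0 < opn ∧ v ≠ prev + 1) := by
      rintro ⟨ho, hne⟩
      have hvp : prev + 1 < v := by
        rcases lt_or_ge (prev + 1) v with h | h
        · exact h
        · omega
      have h3 : c.getD (prev + 1) 0 = 0 := by
        refine hc0 _ (by omega) ?_
        intro hm
        rcases List.mem_cons.mp hm with h' | h'
        · omega
        · have := (List.pairwise_cons.mp hks).1 _ h'; omega
      have hcov : pvCover k (prev + 1) q = pvSum q :=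
        pvCover_eq_sum k (prev + 1) q (fun p hp => by have := hq p hp; omega)
      have := hd (prev + 1) (by omega)
      have := hd0 (prev + 1) (by omega)
      omega
    -- every live group covers v, so B's open count is exactly the cover at v
    have hcovv : pvCover k v q = opn := by
      by_cases hov : 0 < opn
      · have hv1 : v = prev + 1 := by
          by_contra hne
          exact hgap ⟨hov, hne⟩
        subst hv1
        rw [pvCover_eq_sum k (prev + 1) q (fun p hp => by have := hq p hp; omega)]
        omega
      · have hz : opn = 0 := by have := pvSum_nonneg q hpos; omega
        have hqnil : q = [] := pvSum_eq_zero q hpos (by omega)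
        subst hqnil
        simp [pvCover]; omega
    have hlt : ¬ (c.getD v 0 < opn) := by omega
    simp only [pvOuterA, pvRunB, if_neg hgap, if_neg hlt]
    obtain ⟨hq2, hq2p, hsum2, hcov2⟩ :=
      pvStepInv k v prev opn (c.getD v 0) q hvgt hq hqs hopn (by omega)
    have hrest_pair := (List.pairwise_cons.mp hks).2
    have hrest_gt := (List.pairwise_cons.mp hks).1
    have hc0' : ∀ x, v < x → x ∉ rest → c.getD x 0 = 0 := by
      intro x hx hxm
      exact hc0 x (by omega) (by simp [hxm]; omega)
    by_cases h0 : (d.getD v 0 == 0) = true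
    · -- A skips; B starts no new group (its open count stays the cover)
      have hw0 : d.getD v 0 = 0 := by simpa using h0
      rw [if_pos h0]
      refine ih d v _ _ hrest_pair hrest_gt hc0' hq2 hq2p hsum2 ?_ ?_
      · intro x hx
        rw [hd x (by omega), hcov2 x hx]
        have hz : c.getD v 0 - opn = 0 := by omega
        rw [hz]
        simp
      · intro x hx
        exact hd0 x (by omega)
    · -- A starts w = d[v] groups and scans the window; B pushes (v, w)
      have hw : d.getD v 0 ≠ 0 := by simpa using h0
      rw [if_neg h0]
      have hnd : (PySem.List.pyRange v (v + k) 1).Nodup := PySem.List.nodup_pyRange_one v (v + k)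
      rw [pvInnerA_eq_list]
      cases hin : pvInnerL (d.getD v 0) (PySem.List.pyRange v (v + k) 1) d with
      | none =>
        -- A found a deficit inside the window: B is doomed at that value
        obtain ⟨i, hiL, hiv⟩ := (pvInnerL_none_iff _ _ d hnd).mp hin
        have hi := PySem.List.mem_pyRange_one.mp hiL
        have hiv' : v < i := by
          rcases lt_or_ge v i with h | h
          · exact h
          · exfalso
            have hieq : i = v := by omega
            rw [hieq] at hiv
            omega
        refine (pvRunB_doomed k c hcnn rest v _ _ hrest_pair hrest_gt hc0'
          hq2 hq2p hsum2 i hiv' ?_).symm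
        rw [hcov2 i hiv', if_pos (by omega)]
        have := hd i (by omega)
        omega
      | some d' =>
        have hget := pvInnerL_some_getD _ _ d d' hnd hin
        have hnn := pvInnerL_some_nonneg _ _ d d' hnd hin
        refine ih d' v _ _ hrest_pair hrest_gt hc0' hq2 hq2p hsum2 ?_ ?_
        · intro x hx
          rw [hget x, hcov2 x hx]
          by_cases hxw : x ∈ PySem.List.pyRange v (v + k) 1
          · have hb := PySem.List.mem_pyRange_one.mp hxw
            rw [if_pos hxw, if_pos (by omega), hd x (by omega)]
            omega
          · have hb : ¬ (v ≤ x ∧ x < v + k) := fun hc => hxw (PySem.List.mem_pyRange_one.mpr hc)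
            rw [if_neg hxw, if_neg hb, hd x (by omega)]
            omega
        · intro x hx
          by_cases hxw : x ∈ PySem.List.pyRange v (v + k) 1
          · exact hnn x hxw
          · rw [hget x, if_neg hxw]
            exact hd0 x (by omega)

lemma pvOuterA_nonpos (k : Int) (hk : k ≤ 0) : ∀ (ks : List Int) (d : PySem.Dict Int Int),
    pvOuterA k ks d = true := by
  intro ks
  induction ks with
  | nil => intro d; rfl
  | cons v rest ih =>
    intro d
    have hr : ¬ v < v + k := by omega
    by_cases h0 : d.getD v 0 == 0
    · simp [pvOuterA, h0, ih]
    · simp [pvOuterA, h0, pvInnerA, hr, ih]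

lemma pvRunB_nonpos (k : Int) (hk : k ≤ 0) (c : PySem.Dict Int Int)
    (hcnn : ∀ x, 0 ≤ c.getD x 0) :
    ∀ (ks : List Int) (prev : Int), pvRunB c k ks prev 0 [] = true := by
  intro ks
  induction ks with
  | nil => intro prev; rfl
  | cons v rest ih =>
    intro prev
    have h1 : ¬ (0 < (0:Int) ∧ v ≠ prev + 1) := by omega
    have h2 : ¬ (c.getD v 0 < 0) := by have := hcnn v; omega
    simp only [pvRunB, if_neg h1, if_neg h2]
    by_cases hp : (0:Int) < c.getD v 0
    · have hv : v ≤ v - k + 1 := by omega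
      have he : pvExpire k v (c.getD v 0) ([] ++ [(v, c.getD v 0 - 0)]) = (0, []) := by
        simp [pvExpire, hv]
      rw [if_pos hp, he]
      exact ih v
    · have hc0 : c.getD v 0 = 0 := by have := hcnn v; omega
      rw [if_neg hp]
      simp only [pvExpire, hc0]
      exact ih v

lemma pvRunB_start_irrel (c : PySem.Dict Int Int) (k : Int) (ks : List Int) (p p' : Int) :
    pvRunB c k ks p 0 [] = pvRunB c k ks p' 0 [] := by
  cases ks with
  | nil => rfl
  | cons v rest =>
    have h1 : ¬ (0 < (0:Int) ∧ v ≠ p + 1) := by omega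
    have h2 : ¬ (0 < (0:Int) ∧ v ≠ p' + 1) := by omega
    simp only [pvRunB, if_neg h1, if_neg h2]

-- ===== VERDICT (by name: the statement is the Claim_ definition above) =====
theorem isPossibleDivide2_spec : Claim_equal_isPossibleDivide2 := by
  intro nums k _
  unfold Spec_isPossibleDivide2 isPossibleDivide2 isPossibleDivide2_alt
  have hcnn : ∀ x, 0 ≤ (PySem.Dict.counter nums).getD x 0 := by
    intro x
    rw [PySem.Dict.getD_counter]
    exact Int.natCast_nonneg _
  by_cases hk0 : k ≤ 0
  · rw [pvOuterA_nonpos k hk0 _ _, pvRunB_nonpos k hk0 _ hcnn _ 0]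
  · have hk : (1:Int) ≤ k := by omega
    have hpair : (PySem.List.sorted (PySem.Dict.counter nums).keys (fun x => x) false).Pairwise (· < ·) := by
      rw [PySem.Dict.keys_counter]
      exact PySem.List.sorted_ofList_pairwise_lt nums
    have hnotmem : ∀ x, x ∉ PySem.List.sorted (PySem.Dict.counter nums).keys (fun x => x) false →
        (PySem.Dict.counter nums).getD x 0 = 0 := by
      intro x hx
      rw [PySem.List.mem_sorted, PySem.Dict.keys_counter, PySem.Set.mem_ofList] at hx
      rw [PySem.Dict.getD_counter]
      simp [List.count_eq_zero_of_not_mem hx]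
    show pvOuterA k (PySem.List.sorted (PySem.Dict.counter nums).keys (fun x => x) false) (PySem.Dict.counter nums)
        = pvRunB (PySem.Dict.counter nums) k (PySem.List.sorted (PySem.Dict.counter nums).keys (fun x => x) false) 0 0 []
    cases hks : PySem.List.sorted (PySem.Dict.counter nums).keys (fun x => x) false with
    | nil => rfl
    | cons m t =>
      rw [pvRunB_start_irrel _ k _ 0 (m - 1)]
      rw [hks] at hpair hnotmem
      refine pvMainAB k hk _ hcnn (m :: t) _ (m - 1) 0 [] hpair ?_ ?_
        (by simp) (by simp) rfl ?_ (fun x _ => hcnn x)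
      · intro v hv
        rcases List.mem_cons.mp hv with rfl | hv
        · omega
        · have := (List.pairwise_cons.mp hpair).1 v hv
          omega
      · intro x _ hx
        exact hnotmem x hx
      · intro x _
        simp [pvCover]
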